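-- pv_equiv track=rewrite | github.com/SoraiaBarroso/Final_Project | scripts/student_extra_data.py | normalize_season_name
-- ===== SOURCE A (Python) =====
-- def normalize_season_name(season_name):
--     """
--     Normalize season names by removing language-specific suffixes
--     Examples:
--     - "Season 03 Software Engineer Cpp" -> "Season 03 Software Engineering"
--     - "Season 02 Data Science" -> "Season 02 Data Science"
--     - "Season 01 Arc 01" -> "Season 01 Arc 01"
--     """
--     if not season_name:
--         return season_name
--
--     # Common language suffixes to remove
--     language_suffixes = [
--         ' Cpp', ' C++', ' Python', ' JavaScript', ' Java', ' Go', ' Rust',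
--         ' TypeScript', ' PHP', ' Ruby', ' Swift', ' Golang'
--     ]
--
--     normalized = season_name
--
--     # Remove language suffixes
--     for suffix in language_suffixes:
--         if normalized.endswith(suffix):
--             normalized = normalized[:-len(suffix)]
--             break
--
--     # Don't change "Software Engineer" since that's what's in the database
--     # normalized = normalized.replace("Software Engineer", "Software Engineering")
--
--     return normalized
-- ===== SOURCE B (Python) =====
-- LANGS = 'Cpp,C++,Python,JavaScript,Java,Go,Rust,TypeScript,PHP,Ruby,Swift,Golang'.split(',')
--
--
-- def normalize_season_name(season_name):
--     if not season_name:
--         return season_name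
--     head, sep, tail = season_name.rpartition(' ')
--     if sep and tail in LANGS:
--         return head
--     return season_name
-- ===== Notes on version B (the rewrite author's own statement) =====
-- stated objective: idiomatic
-- what changed: Instead of scanning 12 candidate suffixes with endswith and slicing on the first hit, B splits the string once at its last space (rpartition) and drops the final word iff it is one of the language names; correct because no language name contains a space.
import Mathlib
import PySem

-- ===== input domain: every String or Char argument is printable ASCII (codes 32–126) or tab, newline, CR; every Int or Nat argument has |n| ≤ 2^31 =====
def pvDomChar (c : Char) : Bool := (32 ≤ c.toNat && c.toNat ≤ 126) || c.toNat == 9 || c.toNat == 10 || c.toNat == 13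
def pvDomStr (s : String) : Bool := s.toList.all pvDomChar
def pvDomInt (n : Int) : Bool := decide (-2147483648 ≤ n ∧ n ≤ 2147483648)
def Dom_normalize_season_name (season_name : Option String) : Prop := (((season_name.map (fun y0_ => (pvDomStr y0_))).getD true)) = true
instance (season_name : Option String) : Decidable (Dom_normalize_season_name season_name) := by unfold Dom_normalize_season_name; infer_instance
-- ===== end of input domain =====

-- B replaces A's scan over 12 candidate suffixes (endswith + slice each) by ONE split of the
-- string at its last space (rpartition) and a list-membership test on the final word; the return
-- value is unchanged on every input.

-- ===== PORT A =====
-- A's language_suffixes list (char level; string functions are proved on List Char per PySem)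
def pvSuffixes : List (List Char) :=
  [[' ', 'C', 'p', 'p'],
   [' ', 'C', '+', '+'],
   [' ', 'P', 'y', 't', 'h', 'o', 'n'],
   [' ', 'J', 'a', 'v', 'a', 'S', 'c', 'r', 'i', 'p', 't'],
   [' ', 'J', 'a', 'v', 'a'],
   [' ', 'G', 'o'],
   [' ', 'R', 'u', 's', 't'],
   [' ', 'T', 'y', 'p', 'e', 'S', 'c', 'r', 'i', 'p', 't'],
   [' ', 'P', 'H', 'P'],
   [' ', 'R', 'u', 'b', 'y'],
   [' ', 'S', 'w', 'i', 'f', 't'],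
   [' ', 'G', 'o', 'l', 'a', 'n', 'g']]

-- A's for-loop: first suffix that matches is stripped (normalized[:-len(suffix)]) and the loop breaks
def pvALoop : List (List Char) → List Char → List Char
  | [], n => n
  | sfx :: rest, n =>
      if PySem.Chars.endswith n sfx then PySem.List.slice n none (some (-(PySem.List.len sfx)))
      else pvALoop rest n

def normalize_season_name (season_name : Option String) : Option String :=
  match season_name with
  | none => none                                  -- 'if not season_name: return season_name'
  | some s =>
      if s = "" then some s
      else some (String.ofList (pvALoop pvSuffixes s.toList))

-- ===== PORT B =====
-- B's LANGS constant, built exactly as Source B builds it: one comma-joined literal, split once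
def pvLANGS : List (List Char) :=
  (((PySem.Str.split? "Cpp,C++,Python,JavaScript,Java,Go,Rust,TypeScript,PHP,Ruby,Swift,Golang" ",").getD []).map
    String.toList)

-- hand port of s.rpartition(' '): exact — split at the LAST space; ('', '', s) when there is none
def pvRpartitionSpace (cs : List Char) : List Char × List Char × List Char :=
  let rev := cs.reverse
  let t := rev.takeWhile (fun c => decide (c ≠ ' '))
  let r := rev.dropWhile (fun c => decide (c ≠ ' '))
  if r = [] then ([], [], cs) else (r.tail.reverse, [' '], t.reverse)

def normalize_season_name_alt (season_name : Option String) : Option String :=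
  season_name.map fun s =>                        -- 'if not season_name: return season_name' (None stays None)
    if s.toList.isEmpty then s                    -- '' is falsy too
    else
      let (head, sep, tail) := pvRpartitionSpace s.toList
      if sep ≠ [] ∧ tail ∈ pvLANGS then String.ofList head else s

-- ===== PRECONDITION & SPEC =====
def Spec_normalize_season_name (season_name : Option String) (out : Option String) : Prop := out = normalize_season_name_alt season_name
instance (season_name : Option String) (out : Option String) : Decidable (Spec_normalize_season_name season_name out) := by unfold Spec_normalize_season_name; infer_instance

-- ===== CLAIM (what is proved, stated in full; the proofs are below) =====
def Claim_equal_normalize_season_name : Prop := ∀ (season_name : Option String), Dom_normalize_season_name season_name → Spec_normalize_season_name season_name (normalize_season_name season_name)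

-- ===== LEMMAS AND PROOFS =====

-- (w ++ [' ']) is a prefix of l iff l's maximal space-free prefix is exactly w
lemma pv_prefix_iff (w l : List Char) (hw : ∀ c ∈ w, c ≠ ' ') :
    (w ++ [' ']) <+: l ↔
      (l.dropWhile (fun c => decide (c ≠ ' ')) ≠ [] ∧ l.takeWhile (fun c => decide (c ≠ ' ')) = w) := by
  induction w generalizing l with
  | nil =>
      cases l with
      | nil => simp
      | cons a l' =>
          by_cases ha : a = ' '
          · simp [ha, List.cons_prefix_cons]
          · simp only [List.nil_append, List.cons_prefix_cons, List.takeWhile_cons,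
              List.dropWhile_cons]
            constructor
            · rintro ⟨h, -⟩; exact absurd h.symm ha
            · rintro ⟨-, h⟩
              rw [if_pos (by simpa using ha)] at h
              exact absurd h (by simp)
  | cons c w' ih =>
      have hc : c ≠ ' ' := hw c (by simp)
      cases l with
      | nil => simp
      | cons a l' =>
          by_cases hac : a = c
          · subst hac
            simp [hc, List.cons_prefix_cons,
              ih l' (fun x hx => hw x (by simp [hx]))]
          · simp only [List.cons_append, List.cons_prefix_cons, List.takeWhile_cons,
              List.dropWhile_cons]
            constructor
            · rintro ⟨h, -⟩; exact absurd h.symm hac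
            · rintro ⟨-, h⟩
              by_cases ha : a = ' '
              · rw [if_neg (by simpa using ha)] at h
                exact absurd h (by simp)
              · rw [if_pos (by simpa using ha)] at h
                exact absurd (List.head_eq_of_cons_eq h) hac

-- endswith against ' '::w, read off rpartition's pieces
lemma pv_endswith_iff (cs w : List Char) (hw : ∀ c ∈ w, c ≠ ' ') :
    PySem.Chars.endswith cs (' ' :: w) = true ↔
      (cs.reverse.dropWhile (fun c => decide (c ≠ ' ')) ≠ [] ∧
        cs.reverse.takeWhile (fun c => decide (c ≠ ' ')) = w.reverse) := by
  rw [PySem.Chars.endswith_iff]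
  have h1 : (' ' :: w) <:+ cs ↔ (w.reverse ++ [' ']) <+: cs.reverse := by
    constructor
    · intro h
      have := List.reverse_prefix.mpr h
      simpa using this
    · intro h
      have := List.reverse_suffix.mpr h
      simpa using this
  rw [h1, pv_prefix_iff _ _ (by intro c hc; exact hw c (List.mem_reverse.mp hc))]

-- when ' '::w is a suffix, the stripped value cs[:-(len w+1)] is rpartition's head
lemma pv_strip_eq (cs w : List Char)
    (ht : cs.reverse.takeWhile (fun c => decide (c ≠ ' ')) = w.reverse)
    (hr : cs.reverse.dropWhile (fun c => decide (c ≠ ' ')) ≠ []) :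
    PySem.List.slice cs none (some (-((w.length + 1 : Nat) : Int))) =
      (cs.reverse.dropWhile (fun c => decide (c ≠ ' '))).tail.reverse := by
  set r := cs.reverse.dropWhile (fun c => decide (c ≠ ' ')) with hrdef
  have hhead' : r.head hr = ' ' := by
    have h0 := List.head_dropWhile_not (fun c => decide (c ≠ ' ')) hr
    simpa only [decide_eq_false_iff_not, not_not] using h0
  have hrc : r = ' ' :: r.tail := by
    conv_lhs => rw [← List.cons_head_tail hr]
    rw [hhead']
  have hdecomp : cs = r.tail.reverse ++ [' '] ++ w := by
    have h2 : cs.reverse = w.reverse ++ (' ' :: r.tail) := by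
      conv_lhs => rw [← List.takeWhile_append_dropWhile (p := fun c => decide (c ≠ ' ')) (l := cs.reverse)]
      rw [ht, ← hrdef, ← hrc]
    have := congrArg List.reverse h2
    simpa using this
  rw [PySem.List.slice_to_neg_natCast cs (w.length + 1) (by omega)]
  rw [hdecomp]
  have hlen : (r.tail.reverse ++ [' '] ++ w).length = r.tail.length + 1 + w.length := by simp; omega
  rw [hlen]
  have hn : r.tail.length + 1 + w.length - (w.length + 1) = r.tail.length := by omega
  rw [hn, List.append_assoc]
  exact List.take_left' (by simp)

-- the generalized loop/rpartition equivalence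
lemma pv_loop_eq (ws : List (List Char)) (hws : ∀ w ∈ ws, ∀ c ∈ w, c ≠ ' ') (cs : List Char) :
    pvALoop (ws.map (fun w => ' ' :: w)) cs =
      (if (cs.reverse.dropWhile (fun c => decide (c ≠ ' ')) ≠ [] ∧
            (cs.reverse.takeWhile (fun c => decide (c ≠ ' '))).reverse ∈ ws)
        then (cs.reverse.dropWhile (fun c => decide (c ≠ ' '))).tail.reverse else cs) := by
  induction ws with
  | nil => simp [pvALoop]
  | cons w ws' ih =>
      have hw : ∀ c ∈ w, c ≠ ' ' := hws w (by simp)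
      simp only [List.map_cons, pvALoop]
      by_cases he : PySem.Chars.endswith cs (' ' :: w) = true
      · obtain ⟨hr, ht⟩ := (pv_endswith_iff cs w hw).mp he
        have hmem : (cs.reverse.takeWhile (fun c => decide (c ≠ ' '))).reverse ∈ w :: ws' := by
          rw [ht]; simp
        rw [if_pos he, if_pos ⟨hr, hmem⟩]
        have hl : PySem.List.len (' ' :: w) = ((w.length + 1 : Nat) : Int) := by
          simp [PySem.List.len_eq]
        rw [hl]
        exact pv_strip_eq cs w ht hr
      · rw [if_neg he, ih (fun v hv c hc => hws v (by simp [hv]) c hc)]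
        have hne : ¬ (cs.reverse.dropWhile (fun c => decide (c ≠ ' ')) ≠ [] ∧
            cs.reverse.takeWhile (fun c => decide (c ≠ ' ')) = w.reverse) :=
          fun h => he ((pv_endswith_iff cs w hw).mpr h)
        have hiff : (cs.reverse.dropWhile (fun c => decide (c ≠ ' ')) ≠ [] ∧
              (cs.reverse.takeWhile (fun c => decide (c ≠ ' '))).reverse ∈ ws') ↔
            (cs.reverse.dropWhile (fun c => decide (c ≠ ' ')) ≠ [] ∧
              (cs.reverse.takeWhile (fun c => decide (c ≠ ' '))).reverse ∈ w :: ws') := by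
          constructor
          · rintro ⟨h1, h2⟩; exact ⟨h1, List.mem_cons_of_mem _ h2⟩
          · rintro ⟨h1, h2⟩
            rcases List.mem_cons.mp h2 with h3 | h3
            · exact absurd ⟨h1, by simpa using congrArg List.reverse h3⟩ hne
            · exact ⟨h1, h3⟩
        exact if_congr hiff rfl rfl

-- B's split-once LANGS evaluates to the char-level list of the 12 language names
set_option maxRecDepth 8192 in
lemma pvLANGS_eq : pvLANGS =
    [['C', 'p', 'p'],
   ['C', '+', '+'],
   ['P', 'y', 't', 'h', 'o', 'n'],
   ['J', 'a', 'v', 'a', 'S', 'c', 'r', 'i', 'p', 't'],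
   ['J', 'a', 'v', 'a'],
   ['G', 'o'],
   ['R', 'u', 's', 't'],
   ['T', 'y', 'p', 'e', 'S', 'c', 'r', 'i', 'p', 't'],
   ['P', 'H', 'P'],
   ['R', 'u', 'b', 'y'],
   ['S', 'w', 'i', 'f', 't'],
   ['G', 'o', 'l', 'a', 'n', 'g']] := by decide

-- ===== VERDICT (by name: the statement is the Claim_ definition above) =====
set_option maxRecDepth 8192 in
theorem normalize_season_name_spec : Claim_equal_normalize_season_name := by
  intro sn _
  unfold Spec_normalize_season_name
  match sn with
  | none => rfl
  | some s =>
      simp only [normalize_season_name, normalize_season_name_alt, Option.map_some]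
      by_cases hs : s = ""
      · subst hs; rfl
      · have hne : s.toList.isEmpty = false := by
          rw [List.isEmpty_eq_false_iff]
          intro h
          exact hs (by rw [← String.ofList_toList (s := s), h])
        rw [if_neg hs, if_neg (by simp [hne])]
        have hsuff : pvSuffixes =
            ([['C', 'p', 'p'],
   ['C', '+', '+'],
   ['P', 'y', 't', 'h', 'o', 'n'],
   ['J', 'a', 'v', 'a', 'S', 'c', 'r', 'i', 'p', 't'],
   ['J', 'a', 'v', 'a'],
   ['G', 'o'],
   ['R', 'u', 's', 't'],
   ['T', 'y', 'p', 'e', 'S', 'c', 'r', 'i', 'p', 't'],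
   ['P', 'H', 'P'],
   ['R', 'u', 'b', 'y'],
   ['S', 'w', 'i', 'f', 't'],
   ['G', 'o', 'l', 'a', 'n', 'g']].map (fun w => ' ' :: w)) := by rfl
        rw [hsuff, pv_loop_eq _ (by intro w hw c hc; fin_cases hw <;> fin_cases hc <;> decide) s.toList]
        simp only [pvRpartitionSpace, pvLANGS_eq]
        by_cases hr : s.toList.reverse.dropWhile (fun c => decide (c ≠ ' ')) = []
        · rw [if_neg (fun h => h.1 hr), if_pos hr]
          simp
        · rw [if_neg hr]
          by_cases hmem : (s.toList.reverse.takeWhile (fun c => decide (c ≠ ' '))).reverse ∈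
              [['C', 'p', 'p'],
   ['C', '+', '+'],
   ['P', 'y', 't', 'h', 'o', 'n'],
   ['J', 'a', 'v', 'a', 'S', 'c', 'r', 'i', 'p', 't'],
   ['J', 'a', 'v', 'a'],
   ['G', 'o'],
   ['R', 'u', 's', 't'],
   ['T', 'y', 'p', 'e', 'S', 'c', 'r', 'i', 'p', 't'],
   ['P', 'H', 'P'],
   ['R', 'u', 'b', 'y'],
   ['S', 'w', 'i', 'f', 't'],
   ['G', 'o', 'l', 'a', 'n', 'g']]
          · rw [if_pos ⟨hr, hmem⟩, if_pos ⟨by simp, hmem⟩]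
          · rw [if_neg (fun h => hmem h.2), if_neg (fun h => hmem h.2)]
            rw [String.ofList_toList]
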